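-- pv_equiv track=rewrite | github.com/CUNY-TTP-Technical-Interview-Prep/jubilant-fortnight | string/151.reverse-words-in-a-string.py | trim_trailing_spaces
-- ===== SOURCE A (Python) =====
-- def trim_trailing_spaces(t):
--     if ''.join(t).isspace():
--         return []
--     l, r = 0, len(t)-1
--     while l < r and t[l].isspace():
--         l += 1
--     while l < r and t[r].isspace():
--         r -= 1
--     return t[l:r+1]
-- ===== SOURCE B (Python) =====
-- def trim_trailing_spaces(t):
--     if ''.join(t).isspace():
--         return []
--     idx = [i for i in range(len(t)) if not t[i].isspace()]
--     if not idx: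
--         return t[:0]
--     return t[idx[0]:idx[-1] + 1]
-- ===== Notes on version B (the rewrite author's own statement) =====
-- stated objective: alternative
-- what changed: Replaces the two inward-moving while-loop pointers with a single forward pass that collects the indices of all non-whitespace elements and slices once from the first to the last collected index.
import Mathlib
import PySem

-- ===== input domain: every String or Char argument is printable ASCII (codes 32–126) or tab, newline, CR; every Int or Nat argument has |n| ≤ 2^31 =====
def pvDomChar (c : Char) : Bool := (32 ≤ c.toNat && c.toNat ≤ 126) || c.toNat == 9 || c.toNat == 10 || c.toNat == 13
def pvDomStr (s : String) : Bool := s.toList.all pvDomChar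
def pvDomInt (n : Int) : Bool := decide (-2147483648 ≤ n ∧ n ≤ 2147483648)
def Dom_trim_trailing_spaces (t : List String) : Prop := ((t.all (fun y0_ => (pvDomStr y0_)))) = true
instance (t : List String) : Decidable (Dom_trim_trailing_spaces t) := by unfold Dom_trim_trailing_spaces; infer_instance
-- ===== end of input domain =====

-- B replaces A's two inward-moving trimming pointers by one forward pass collecting
-- the indices of the non-whitespace elements and a single slice; same cost, different decomposition.

-- ===== PORT A =====
-- while l < r and t[l].isspace(): l += 1   (t[l] is always in range here, so pyGetD is exact)
def pyLoopL (t : List String) (r : Int) (l : Int) : Int :=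
  if l < r ∧ PySem.Str.strIsspace (PySem.List.pyGetD t l "") = true then pyLoopL t r (l + 1) else l
termination_by (r - l).toNat
decreasing_by omega

-- while l < r and t[r].isspace(): r -= 1
def pyLoopR (t : List String) (l : Int) (r : Int) : Int :=
  if l < r ∧ PySem.Str.strIsspace (PySem.List.pyGetD t r "") = true then pyLoopR t l (r - 1) else r
termination_by (r - l).toNat
decreasing_by omega

def trim_trailing_spaces (t : List String) : List String :=
  if PySem.Str.strIsspace (PySem.Str.join "" t) then []
  else
    let l := pyLoopL t ((t.length : Int) - 1) 0
    let r := pyLoopR t l ((t.length : Int) - 1)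
    PySem.List.slice t (some l) (some (r + 1))

-- ===== PORT B =====
-- idx = [i for i in range(len(t)) if not t[i].isspace()]  (indices are the Nats of List.range)
def nonspaceIdx (t : List String) : List Nat :=
  (List.range t.length).filter
    (fun i => !(PySem.Str.strIsspace (PySem.List.pyGetD t (i : Int) "")))

def trim_trailing_spaces_alt (t : List String) : List String :=
  if PySem.Str.strIsspace (PySem.Str.join "" t) then []
  else
    match nonspaceIdx t with
    | [] => PySem.List.slice t none (some 0)     -- t[:0]
    | i :: rest =>
        PySem.List.slice t (some (i : Int))
          (some (((i :: rest).getLast (List.cons_ne_nil _ _) : Int) + 1))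

-- ===== PRECONDITION & SPEC =====
def Spec_trim_trailing_spaces (t : List String) (out : List String) : Prop := out = trim_trailing_spaces_alt t
instance (t : List String) (out : List String) : Decidable (Spec_trim_trailing_spaces t out) := by unfold Spec_trim_trailing_spaces; infer_instance

-- ===== CLAIM (what is proved, stated in full; the proofs are below) =====
def Claim_equal_trim_trailing_spaces : Prop := ∀ (t : List String), Dom_trim_trailing_spaces t → Spec_trim_trailing_spaces t (trim_trailing_spaces t)

-- ===== LEMMAS AND PROOFS =====

-- The left pointer loop stops exactly at the first non-whitespace index i0.
lemma loopL_eq (t : List String) (i0 : Nat) (hin : i0 < t.length)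
    (hP : PySem.Str.strIsspace (t.getD i0 "") = false)
    (hmin : ∀ k, k < i0 → PySem.Str.strIsspace (t.getD k "") = true) :
    ∀ d l, l ≤ i0 → i0 - l ≤ d → pyLoopL t ((t.length : Int) - 1) (l : Int) = (i0 : Int) := by
  intro d
  induction d with
  | zero =>
      intro l hl hd
      have : l = i0 := by omega
      subst this
      rw [pyLoopL, if_neg]
      intro hc
      have h2 := hc.2
      rw [PySem.List.pyGetD_natCast, hP] at h2
      cases h2
  | succ d ih =>
      intro l hl hd
      by_cases hli : l = i0
      · subst hli
        rw [pyLoopL, if_neg]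
        intro hc
        have h2 := hc.2
        rw [PySem.List.pyGetD_natCast, hP] at h2
        cases h2
      · have hlt : l < i0 := by omega
        rw [pyLoopL]
        have hc : ((l : Int) < (t.length : Int) - 1 ∧
            PySem.Str.strIsspace (PySem.List.pyGetD t (l : Int) "") = true) := by
          constructor
          · omega
          · rw [PySem.List.pyGetD_natCast]; exact hmin l hlt
        rw [if_pos hc]
        have : ((l : Int) + 1) = ((l + 1 : Nat) : Int) := by push_cast; ring
        rw [this]
        exact ih (l + 1) (by omega) (by omega)

-- The right pointer loop stops exactly at the last non-whitespace index j0.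
lemma loopR_eq (t : List String) (j0 : Nat) (hin : j0 < t.length)
    (hP : PySem.Str.strIsspace (t.getD j0 "") = false)
    (hmax : ∀ k, j0 < k → k < t.length → PySem.Str.strIsspace (t.getD k "") = true)
    (lo : Int) (hlo : lo ≤ (j0 : Int)) :
    ∀ d r, j0 ≤ r → r < t.length → r - j0 ≤ d → pyLoopR t lo (r : Int) = (j0 : Int) := by
  intro d
  induction d with
  | zero =>
      intro r hr hrn hd
      have : r = j0 := by omega
      subst this
      rw [pyLoopR, if_neg]
      intro hc
      have h2 := hc.2
      rw [PySem.List.pyGetD_natCast, hP] at h2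
      cases h2
  | succ d ih =>
      intro r hr hrn hd
      by_cases hrj : r = j0
      · subst hrj
        rw [pyLoopR, if_neg]
        intro hc
        have h2 := hc.2
        rw [PySem.List.pyGetD_natCast, hP] at h2
        cases h2
      · have hgt : j0 < r := by omega
        rw [pyLoopR]
        have hc : (lo < (r : Int) ∧
            PySem.Str.strIsspace (PySem.List.pyGetD t (r : Int) "") = true) := by
          constructor
          · omega
          · rw [PySem.List.pyGetD_natCast]; exact hmax r hgt hrn
        rw [if_pos hc]
        have : ((r : Int) - 1) = ((r - 1 : Nat) : Int) := by omega
        rw [this]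
        exact ih (r - 1) (by omega) (by omega) (by omega)

-- In a strictly increasing list, every member is at most the last element.
lemma le_getLast_of_pairwise {l : List Nat} (hp : l.Pairwise (· < ·)) (hne : l ≠ [])
    {x : Nat} (hx : x ∈ l) : x ≤ l.getLast hne := by
  induction l with
  | nil => cases hx
  | cons a as ih =>
      rcases as with _ | ⟨b, bs⟩
      · simp at hx; simp [hx, List.getLast]
      · rw [List.getLast_cons (List.cons_ne_nil _ _)]
        rcases List.mem_cons.mp hx with h | h
        · subst h
          have := List.rel_of_pairwise_cons hp
              (List.getLast_mem (l := b :: bs) (List.cons_ne_nil _ _))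
          omega
        · exact ih (List.Pairwise.of_cons hp) (List.cons_ne_nil _ _) h

lemma flatten_intersperse_nil {a : Type} (l : List (List a)) :
    (List.intersperse ([] : List a) l).flatten = l.flatten := by
  induction l with
  | nil => rfl
  | cons x xs ih =>
      cases xs with
      | nil => rfl
      | cons y ys => simp [List.intersperse] at ih ⊢; simpa using ih

-- If a string all of whose elements are whitespace-or-empty has a nonempty element,
-- the guard ''.join(t).isspace() is true.
lemma guard_true_of_all_space (t : List String)
    (hall : ∀ i, i < t.length → PySem.Str.strIsspace (t.getD i "") = true)
    (hne : t ≠ []) : PySem.Str.strIsspace (PySem.Str.join "" t) = true := by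
  rw [PySem.Str.strIsspace_eq, PySem.Str.toList_join]
  have hjoin : PySem.Chars.join "".toList (List.map String.toList t)
      = (List.map String.toList t).flatten := by
    show PySem.Chars.join [] _ = _
    rw [PySem.Chars.join, List.intercalate]
    exact flatten_intersperse_nil _
  rw [hjoin]
  unfold PySem.Chars.strIsspace
  -- every element is nonempty and all-whitespace
  have helem : ∀ s ∈ t, s.toList ≠ [] ∧ s.toList.all PySem.Chars.isspace = true := by
    intro s hs
    obtain ⟨i, hi, hgi⟩ := List.mem_iff_getElem.mp hs
    have := hall i hi
    rw [List.getD_eq_getElem t "" hi, hgi, PySem.Str.strIsspace_eq] at this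
    unfold PySem.Chars.strIsspace at this
    simp only [Bool.and_eq_true, Bool.not_eq_true'] at this
    exact ⟨by simpa [List.isEmpty_iff] using this.1, this.2⟩
  have h1 : ((List.map String.toList t).flatten).isEmpty = false := by
    rcases t with _ | ⟨s, rest⟩
    · exact absurd rfl hne
    · have hs := helem s (List.mem_cons_self ..)
      simp only [List.map_cons, List.flatten_cons, List.isEmpty_eq_false_iff]
      intro hcon
      rcases List.append_eq_nil_iff.mp hcon with ⟨h, _⟩
      exact hs.1 h
  have h2 : ((List.map String.toList t).flatten).all PySem.Chars.isspace = true := by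
    rw [List.all_eq_true]
    intro c hc
    obtain ⟨cs, hcs, hcmem⟩ := List.mem_flatten.mp hc
    obtain ⟨s, hsmem, hseq⟩ := List.mem_map.mp hcs
    have := (helem s hsmem).2
    rw [List.all_eq_true] at this
    exact this c (hseq ▸ hcmem)
  rw [h1, h2]; rfl

theorem trim_trailing_spaces_eq (t : List String) :
    trim_trailing_spaces t = trim_trailing_spaces_alt t := by
  unfold trim_trailing_spaces trim_trailing_spaces_alt
  by_cases hg : PySem.Str.strIsspace (PySem.Str.join "" t) = true
  · rw [if_pos hg, if_pos hg]
  · rw [if_neg hg, if_neg hg]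
    have hmem : ∀ k, k ∈ nonspaceIdx t ↔ k < t.length ∧
        PySem.Str.strIsspace (t.getD k "") = false := by
      intro k
      unfold nonspaceIdx
      rw [List.mem_filter, List.mem_range]
      simp [PySem.List.pyGetD_natCast]
    have hpair : (nonspaceIdx t).Pairwise (· < ·) :=
      List.Pairwise.filter _ List.pairwise_lt_range
    rcases hidx : nonspaceIdx t with _ | ⟨i, rest⟩
    · rw [hidx] at hmem
      -- idx empty: no index is non-whitespace; since the guard is false, t must be []
      have hall : ∀ k, k < t.length → PySem.Str.strIsspace (t.getD k "") = true := by
        intro k hk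
        by_contra hcon
        have : k ∈ ([] : List Nat) := (hmem k).mpr
          ⟨hk, by revert hcon; cases (PySem.Str.strIsspace (t.getD k "")) <;> simp⟩
        cases this
      have ht : t = [] := by
        by_contra hne
        exact hg (guard_true_of_all_space t hall hne)
      subst ht
      simp [pyLoopL, pyLoopR, PySem.List.slice]
    · rw [hidx] at hmem hpair
      -- head i is the first non-whitespace index
      have hi_mem : i ∈ i :: rest := List.mem_cons_self ..
      have hi := (hmem i).mp hi_mem
      have hi_min : ∀ k, k < i → PySem.Str.strIsspace (t.getD k "") = true := by
        intro k hk
        by_contra hcon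
        have hkn : k < t.length := by omega
        have hkmem : k ∈ i :: rest := (hmem k).mpr
          ⟨hkn, by revert hcon; cases (PySem.Str.strIsspace (t.getD k "")) <;> simp⟩
        rcases List.mem_cons.mp hkmem with he | hm
        · omega
        · have := List.rel_of_pairwise_cons hpair hm; omega
      -- the last element j is the last non-whitespace index
      set j := (i :: rest).getLast (List.cons_ne_nil _ _) with hj
      have hj_mem : j ∈ i :: rest := List.getLast_mem _
      have hjp := (hmem j).mp hj_mem
      have hij : i ≤ j := le_getLast_of_pairwise hpair (List.cons_ne_nil _ _) hi_mem
      have hj_max : ∀ k, j < k → k < t.length → PySem.Str.strIsspace (t.getD k "") = true := by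
        intro k hk hkn
        by_contra hcon
        have hkmem : k ∈ i :: rest := (hmem k).mpr
          ⟨hkn, by revert hcon; cases (PySem.Str.strIsspace (t.getD k "")) <;> simp⟩
        have := le_getLast_of_pairwise hpair (List.cons_ne_nil _ _) hkmem
        omega
      have hL : pyLoopL t ((t.length : Int) - 1) (0 : Int) = (i : Int) := by
        have := loopL_eq t i hi.1 hi.2 hi_min i 0 (by omega) (by omega)
        simpa using this
      have hR : pyLoopR t (i : Int) ((t.length : Int) - 1) = (j : Int) := by
        have hcast : ((t.length : Int) - 1) = ((t.length - 1 : Nat) : Int) := by omega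
        rw [hcast]
        exact loopR_eq t j hjp.1 hjp.2 hj_max (i : Int) (by exact_mod_cast hij)
          (t.length - 1) (t.length - 1) (by omega) (by omega) (by omega)
      simp only [hL, hR]
      rw [hj]

-- ===== VERDICT (by name: the statement is the Claim_ definition above) =====
theorem trim_trailing_spaces_spec : Claim_equal_trim_trailing_spaces := by
  intro t _
  unfold Spec_trim_trailing_spaces
  exact trim_trailing_spaces_eq t
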